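-- pv_equiv track=rewrite | github.com/philippeZim/AdventOfCode2023 | Day14/main.py | rollStones
-- ===== SOURCE A (Python) =====
-- def rollStones(m):
--     res = []
--     for x in m:
--         lline = [y for y in x]
--         lp = 0
--         for i, x in enumerate(lline):
--             if x == "O":
--                 lline[lp] = "O"
--                 lp += 1
--                 if lp - 1 != i:
--                     lline[i] = "."
--             elif x == "#":
--                 lp = i + 1
--         res.append("".join(lline))
--     return res
-- ===== SOURCE B (Python) =====
-- def rollStones(m):
--     res = []
--     for x in m:
--         s = "".join(x)
--         rebuilt = []
--         for seg in s.split("#"):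
--             c = seg.count("O")
--             rebuilt.append("O" * c + seg[c:].replace("O", "."))
--         res.append("#".join(rebuilt))
--     return res
-- ===== Notes on version B (the rewrite author's own statement) =====
-- stated objective: simpler
-- what changed: A packs stones with a per-cell two-pointer loop mutating the row in place; B splits each row on '#', and for each segment emits 'O'*count + remainder with 'O' replaced by '.', rejoining with '#'.
import Mathlib
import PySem

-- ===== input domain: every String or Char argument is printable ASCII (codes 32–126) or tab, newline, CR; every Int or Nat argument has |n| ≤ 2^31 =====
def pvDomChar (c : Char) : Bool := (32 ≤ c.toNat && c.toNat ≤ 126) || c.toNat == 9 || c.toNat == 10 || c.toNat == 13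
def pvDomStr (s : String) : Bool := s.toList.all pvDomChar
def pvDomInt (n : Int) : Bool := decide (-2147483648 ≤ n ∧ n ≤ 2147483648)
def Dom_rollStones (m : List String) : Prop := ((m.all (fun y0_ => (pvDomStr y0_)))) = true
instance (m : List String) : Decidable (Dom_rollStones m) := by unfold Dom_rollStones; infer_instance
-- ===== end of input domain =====

-- B replaces A's per-cell two-pointer in-place pack by a segment-wise count-and-rebuild
-- (split each row on '#', emit 'O'*count + rest with 'O'→'.'); objective: simpler.

-- ===== PORT A =====
-- one step of A's inner 'for i, x in enumerate(lline)' loop; state = (lline, lp)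
def rollRowStep (st : List Char × Int) (p : Int × Char) : List Char × Int :=
  let lline := st.1
  let lp := st.2
  if p.2 = 'O' then
    let lline := lline.set lp.toNat 'O'
    let lp := lp + 1
    let lline := if lp - 1 ≠ p.1 then lline.set p.1.toNat '.' else lline
    (lline, lp)
  else if p.2 = '#' then (lline, p.1 + 1)
  else (lline, lp)

-- one iteration of A's outer loop: lline = list(x); the inner loop; "".join(lline).
-- Folding over 'enumerate' of the INITIAL lline is exact: Python's in-place writes
-- (at lp ≤ i and at i) never touch an index the live iterator has still to yield.
def rollRow (x : String) : String :=
  let lline := x.toList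
  String.mk ((PySem.List.enumerate lline).foldl rollRowStep (lline, 0)).1

def rollStones (m : List String) : List String :=
  m.foldl (fun res x => res ++ [rollRow x]) []

-- ===== PORT B =====
-- one iteration of B's outer loop; s = "".join(x) of a str is the string itself
def rollRowAlt (x : String) : String :=
  let s := x.toList
  let rebuilt := (PySem.Chars.splitOn s ['#']).foldl
    (fun rebuilt seg =>
      let c := PySem.Chars.count seg ['O']
      rebuilt ++ [PySem.List.pyRepeat ['O'] (c : Int) ++
        PySem.Chars.replace (PySem.Chars.slice seg (some (c : Int)) none) ['O'] ['.']]) []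
  String.mk (PySem.Chars.join ['#'] rebuilt)

def rollStones_alt (m : List String) : List String :=
  m.foldl (fun res x => res ++ [rollRowAlt x]) []

-- ===== PRECONDITION & SPEC =====
def Spec_rollStones (m : List String) (out : List String) : Prop := out = rollStones_alt m
instance (m : List String) (out : List String) : Decidable (Spec_rollStones m out) := by unfold Spec_rollStones; infer_instance

-- ===== CLAIM (what is proved, stated in full; the proofs are below) =====
def Claim_equal_rollStones : Prop := ∀ (m : List String), Dom_rollStones m → Spec_rollStones m (rollStones m)

-- ===== LEMMAS AND PROOFS =====

-- 'O' → '.', everything else fixed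
def dotO (c : Char) : Char := if c = 'O' then '.' else c

-- the rolled form of one '#'-free segment
def rollSeg (s : List Char) : List Char :=
  List.replicate (s.count 'O') 'O' ++ (s.drop (s.count 'O')).map dotO

-- split on '#', carrying the current (already read) segment prefix
def mySplit (pre : List Char) : List Char → List (List Char)
  | [] => [pre]
  | c :: t => if c = '#' then pre :: mySplit [] t else mySplit (pre ++ [c]) t

-- the rolled row, given the raw current segment s and the remaining characters
def rollRest (s : List Char) : List Char → List Char
  | [] => rollSeg s
  | c :: t => if c = '#' then rollSeg s ++ '#' :: rollRest [] t else rollRest (s ++ [c]) t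

theorem rollSeg_length (s : List Char) : (rollSeg s).length = s.length := by
  have := List.count_le_length (l := s) (a := 'O')
  simp [rollSeg]; omega

theorem rollSeg_nil : rollSeg [] = [] := by simp [rollSeg]

theorem set_len_append {α : Type} (b : List α) (x : α) (t : List α) (a : α) :
    (b ++ x :: t).set b.length a = b ++ a :: t := by
  simp [List.set_append]

theorem isPrefixOf_singleton (a c : Char) (t : List Char) :
    [a].isPrefixOf (c :: t) = (a == c) := by
  simp [List.isPrefixOf]

theorem splitOn_go_hash : ∀ (l : List Char) (fuel : Nat), l.length ≤ fuel →
    ∀ (cur : List Char) (acc : List (List Char)),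
    PySem.Chars.splitOn.go ['#'] fuel l cur acc = acc.reverse ++ mySplit cur.reverse l := by
  intro l
  induction l with
  | nil => intro fuel _ cur acc; cases fuel <;> simp [PySem.Chars.splitOn.go, mySplit]
  | cons c t ih =>
    intro fuel hf cur acc
    cases fuel with
    | zero => simp at hf
    | succ f =>
      simp only [PySem.Chars.splitOn.go, isPrefixOf_singleton]
      by_cases h : c = '#'
      · subst h
        simp only [BEq.rfl, if_true, List.length_cons, List.length_nil, Nat.zero_add, List.drop_succ_cons, List.drop_zero]
        rw [ih f (by simpa using hf)]
        simp [mySplit]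
      · have h' : ('#' == c) = false := by simpa using fun e => h e.symm
        simp [h', ih f (by simpa using hf), mySplit, h]

theorem splitOn_hash (l : List Char) : PySem.Chars.splitOn l ['#'] = mySplit [] l := by
  have h := splitOn_go_hash l (l.length + 1) (by omega) [] []
  simpa [PySem.Chars.splitOn] using h

theorem count_go_singleton (a : Char) : ∀ (l : List Char) (fuel : Nat), l.length ≤ fuel →
    ∀ (acc : Nat), PySem.Chars.count.go [a] fuel l acc = acc + l.count a := by
  intro l
  induction l with
  | nil => intro fuel _ acc; cases fuel <;> simp [PySem.Chars.count.go]
  | cons c t ih =>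
    intro fuel hf acc
    cases fuel with
    | zero => simp at hf
    | succ f =>
      simp only [PySem.Chars.count.go, isPrefixOf_singleton]
      by_cases h : a = c
      · subst h
        simp only [BEq.rfl, if_true, List.length_cons, List.length_nil, Nat.zero_add, List.drop_succ_cons, List.drop_zero]
        rw [ih f (by simpa using hf)]
        simp [List.count_cons]; omega
      · have h' : (a == c) = false := by simpa using h
        simp [h', ih f (by simpa using hf), List.count_cons, Ne.symm h]

theorem count_singleton (l : List Char) (a : Char) : PySem.Chars.count l [a] = l.count a := by
  have h := count_go_singleton a l l.length (by omega) 0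
  simpa [PySem.Chars.count] using h

theorem replace_go_singleton (a b : Char) : ∀ (l : List Char) (fuel : Nat), l.length ≤ fuel →
    ∀ (acc : List Char),
    PySem.Chars.replace.go [a] [b] fuel l acc
      = acc.reverse ++ l.map (fun c => if c = a then b else c) := by
  intro l
  induction l with
  | nil => intro fuel _ acc; cases fuel <;> simp [PySem.Chars.replace.go]
  | cons c t ih =>
    intro fuel hf acc
    cases fuel with
    | zero => simp at hf
    | succ f =>
      simp only [PySem.Chars.replace.go, isPrefixOf_singleton]
      by_cases h : a = c
      · subst h
        simp only [BEq.rfl, if_true, List.length_cons, List.length_nil, Nat.zero_add, List.drop_succ_cons, List.drop_zero]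
        rw [ih f (by simpa using hf)]
        simp
      · have h' : (a == c) = false := by simpa using h
        simp [h', ih f (by simpa using hf), Ne.symm h]

theorem replace_singleton (l : List Char) (a b : Char) :
    PySem.Chars.replace l [a] [b] = l.map (fun c => if c = a then b else c) := by
  have h := replace_go_singleton a b l l.length (by omega) []
  simpa [PySem.Chars.replace] using h

theorem mySplit_ne_nil (pre l : List Char) : mySplit pre l ≠ [] := by
  induction l generalizing pre with
  | nil => simp [mySplit]
  | cons c t ih => by_cases h : c = '#' <;> simp [mySplit, h, ih]

theorem join_map_mySplit : ∀ (l pre : List Char),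
    PySem.Chars.join ['#'] ((mySplit pre l).map rollSeg) = rollRest pre l := by
  intro l
  induction l with
  | nil => intro pre; simp [mySplit, rollRest, PySem.Chars.join_singleton]
  | cons c t ih =>
    intro pre
    by_cases h : c = '#'
    · subst h
      have ht := ih []
      rw [show mySplit pre ('#' :: t) = pre :: mySplit [] t from by simp [mySplit],
          show rollRest pre ('#' :: t) = rollSeg pre ++ '#' :: rollRest [] t from by
            simp [rollRest]]
      cases hq : mySplit [] t with
      | nil => exact absurd hq (mySplit_ne_nil [] t)
      | cons q rest =>
        rw [hq] at ht
        simp only [List.map_cons] at ht ⊢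
        rw [PySem.Chars.join_cons_cons, ht]
        simp
    · rw [show mySplit pre (c :: t) = mySplit (pre ++ [c]) t from by simp [mySplit, h],
          show rollRest pre (c :: t) = rollRest (pre ++ [c]) t from by simp [rollRest, h]]
      exact ih (pre ++ [c])

theorem rowB (x : String) : rollRowAlt x = String.mk (rollRest [] x.toList) := by
  unfold rollRowAlt
  simp only [PySem.List.foldl_append_singleton_eq_map, List.nil_append]
  rw [splitOn_hash]
  refine congrArg String.mk ?_
  rw [← join_map_mySplit x.toList []]
  refine congrArg _ (List.map_congr_left fun seg _ => ?_)
  simp [count_singleton, PySem.List.pyRepeat_singleton, replace_singleton, rollSeg,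
    PySem.Chars.slice, PySem.List.slice_from_natCast]
  rfl

theorem rollSeg_append_other (s : List Char) (c : Char) (h : c ≠ 'O') :
    rollSeg (s ++ [c]) = rollSeg s ++ [c] := by
  have hle := List.count_le_length (l := s) (a := 'O')
  have hcc : (c == 'O') = false := by simpa using h
  simp only [rollSeg, List.count_append, List.count_cons, List.count_nil, hcc, if_false,
    Nat.zero_add, Nat.add_zero, Bool.false_eq_true]
  rw [List.drop_append_of_le_length hle]
  simp [dotO, h, List.append_assoc]

theorem rollA_inv : ∀ (rest s b : List Char),
    ((PySem.List.enumerate rest ((b.length + s.length : Nat) : Int)).foldl rollRowStep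
      (b ++ rollSeg s ++ rest, ((b.length + s.count 'O' : Nat) : Int))).1
    = b ++ rollRest s rest := by
  intro rest
  induction rest with
  | nil =>
    intro s b
    simp [PySem.List.enumerate, rollRest]
  | cons c t ih =>
    intro s b
    rw [PySem.List.enumerate_cons, List.foldl_cons]
    have hle := List.count_le_length (l := s) (a := 'O')
    by_cases hO : c = 'O'
    · subst hO
      by_cases hc : s.count 'O' = s.length
      · -- the whole current segment is already 'O's: the two writes change nothing
        have hdrop : s.drop (s.count 'O') = [] := by rw [hc]; exact List.drop_length
        have hstep : rollRowStep (b ++ rollSeg s ++ 'O' :: t, ((b.length + s.count 'O' : Nat) : Int))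
            (((b.length + s.length : Nat) : Int), 'O')
            = (b ++ rollSeg (s ++ ['O']) ++ t, ((b.length + (s ++ ['O']).count 'O' : Nat) : Int)) := by
          simp only [rollRowStep]
          simp only [if_true]
          rw [if_neg (by push_cast; omega)]
          simp only [Prod.mk.injEq]
          refine ⟨?_, by simp [List.count_append]; push_cast; ring⟩
          rw [Int.toNat_natCast]
          have i1 : b.length + s.count 'O' = (b ++ rollSeg s).length := by
            simp [rollSeg_length, hc]
          rw [i1, set_len_append]
          have hO1 : List.count 'O' ['O'] = 1 := by simp
          have e1 : rollSeg (s ++ ['O']) = rollSeg s ++ ['O'] := by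
            simp only [rollSeg, List.count_append, hO1, hdrop]
            rw [show List.count 'O' s + 1 = (s ++ ['O']).length from by rw [hc]; simp,
                List.drop_length]
            simp only [List.length_append, List.length_cons, List.length_nil, ← hc]
            simp [List.replicate_succ']
          rw [e1]
          simp [List.append_assoc]
        rw [hstep,
            show ((b.length + s.length : Nat) : Int) + 1
              = ((b.length + (s ++ ['O']).length : Nat) : Int) from by push_cast; simp; ring,
            show rollRest s ('O' :: t) = rollRest (s ++ ['O']) t from by simp [rollRest]]
        exact ih (s ++ ['O']) b
      · -- a stone rolls onto the first free cell of the segment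
        have hlt : s.count 'O' < s.length := by omega
        have hdc : s.drop (s.count 'O') = s[s.count 'O'] :: s.drop (s.count 'O' + 1) :=
          List.drop_eq_getElem_cons hlt
        have e0 : rollSeg s = List.replicate (s.count 'O') 'O'
            ++ dotO s[s.count 'O'] :: (s.drop (s.count 'O' + 1)).map dotO := by
          rw [rollSeg, hdc, List.map_cons]
        have hstep : rollRowStep (b ++ rollSeg s ++ 'O' :: t, ((b.length + s.count 'O' : Nat) : Int))
            (((b.length + s.length : Nat) : Int), 'O')
            = (b ++ rollSeg (s ++ ['O']) ++ t, ((b.length + (s ++ ['O']).count 'O' : Nat) : Int)) := by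
          simp only [rollRowStep]
          simp only [if_true]
          rw [if_pos (by push_cast; omega)]
          simp only [Prod.mk.injEq]
          refine ⟨?_, by simp [List.count_append]; push_cast; ring⟩
          rw [Int.toNat_natCast, Int.toNat_natCast]
          have r1 : b ++ rollSeg s ++ 'O' :: t = (b ++ List.replicate (s.count 'O') 'O')
              ++ dotO s[s.count 'O'] :: ((s.drop (s.count 'O' + 1)).map dotO ++ 'O' :: t) := by
            rw [e0]; simp [List.append_assoc]
          rw [r1,
            show b.length + s.count 'O' = (b ++ List.replicate (s.count 'O') 'O').length from by
              simp,
            set_len_append,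
            show (b ++ List.replicate (s.count 'O') 'O')
                ++ 'O' :: ((s.drop (s.count 'O' + 1)).map dotO ++ 'O' :: t)
              = ((b ++ List.replicate (s.count 'O') 'O')
                ++ 'O' :: (s.drop (s.count 'O' + 1)).map dotO) ++ 'O' :: t from by
              simp [List.append_assoc],
            show b.length + s.length = ((b ++ List.replicate (s.count 'O') 'O')
                ++ 'O' :: (s.drop (s.count 'O' + 1)).map dotO).length from by simp; omega,
            set_len_append]
          have hO1 : List.count 'O' ['O'] = 1 := by simp
          have e1 : rollSeg (s ++ ['O']) = List.replicate (s.count 'O' + 1) 'O'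
              ++ ((s.drop (s.count 'O' + 1)).map dotO ++ ['.']) := by
            simp only [rollSeg, List.count_append, hO1]
            rw [List.drop_append_of_le_length (by omega)]
            simp [dotO]
          rw [e1]
          simp [List.replicate_succ', List.append_assoc]
        rw [hstep,
            show ((b.length + s.length : Nat) : Int) + 1
              = ((b.length + (s ++ ['O']).length : Nat) : Int) from by push_cast; simp; ring,
            show rollRest s ('O' :: t) = rollRest (s ++ ['O']) t from by simp [rollRest]]
        exact ih (s ++ ['O']) b
    · by_cases hH : c = '#'
      · subst hH
        have hstep : rollRowStep (b ++ rollSeg s ++ '#' :: t, ((b.length + s.count 'O' : Nat) : Int))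
            (((b.length + s.length : Nat) : Int), '#')
            = (b ++ rollSeg s ++ '#' :: t, ((b.length + s.length : Nat) : Int) + 1) := by
          simp [rollRowStep]
        rw [hstep]
        have h1 : b ++ rollSeg s ++ '#' :: t = (b ++ rollSeg s ++ ['#']) ++ rollSeg [] ++ t := by
          simp [rollSeg_nil, List.append_assoc]
        have h2 : ((b.length + s.length : Nat) : Int) + 1
            = (((b ++ rollSeg s ++ ['#']).length + ([] : List Char).length : Nat) : Int) := by
          push_cast [List.length_append, List.length_cons, List.length_nil, rollSeg_length,
            List.count_nil]
          try omega
        have h3 : ((b.length + s.length : Nat) : Int) + 1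
            = (((b ++ rollSeg s ++ ['#']).length + ([] : List Char).count 'O' : Nat) : Int) := by
          push_cast [List.length_append, List.length_cons, List.length_nil, rollSeg_length,
            List.count_nil]
          try omega
        rw [show rollRest s ('#' :: t) = rollSeg s ++ '#' :: rollRest [] t from by simp [rollRest]]
        calc ((PySem.List.enumerate t (((b.length + s.length : Nat) : Int) + 1)).foldl rollRowStep
            (b ++ rollSeg s ++ '#' :: t, ((b.length + s.length : Nat) : Int) + 1)).1
            = ((PySem.List.enumerate t
                (((b ++ rollSeg s ++ ['#']).length + ([] : List Char).length : Nat) : Int)).foldl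
              rollRowStep ((b ++ rollSeg s ++ ['#']) ++ rollSeg [] ++ t,
                (((b ++ rollSeg s ++ ['#']).length + ([] : List Char).count 'O' : Nat) : Int))).1 := by
              rw [← h1, ← h2, ← h3]
          _ = (b ++ rollSeg s ++ ['#']) ++ rollRest [] t := ih [] (b ++ rollSeg s ++ ['#'])
          _ = b ++ (rollSeg s ++ '#' :: rollRest [] t) := by simp [List.append_assoc]
      · have hstep : rollRowStep (b ++ rollSeg s ++ c :: t, ((b.length + s.count 'O' : Nat) : Int))
            (((b.length + s.length : Nat) : Int), c)
            = (b ++ rollSeg (s ++ [c]) ++ t, ((b.length + (s ++ [c]).count 'O' : Nat) : Int)) := by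
          simp only [rollRowStep]
          rw [if_neg hO, if_neg hH]
          simp only [Prod.mk.injEq]
          constructor
          · rw [rollSeg_append_other s c hO]
            simp [List.append_assoc]
          · have hcc : (c == 'O') = false := by simpa using hO
            simp [List.count_append, List.count_cons, List.count_nil, hcc]
        rw [hstep,
            show ((b.length + s.length : Nat) : Int) + 1
              = ((b.length + (s ++ [c]).length : Nat) : Int) from by push_cast; simp; ring,
            show rollRest s (c :: t) = rollRest (s ++ [c]) t from by simp [rollRest, hH]]
        exact ih (s ++ [c]) b

theorem rowA (x : String) : rollRow x = String.mk (rollRest [] x.toList) := by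
  have h := rollA_inv x.toList [] []
  simp only [List.length_nil, List.count_nil, rollSeg_nil, List.nil_append, Nat.add_zero,
    Nat.cast_zero] at h
  exact congrArg String.mk h

-- ===== VERDICT (by name: the statement is the Claim_ definition above) =====
theorem rollStones_spec : Claim_equal_rollStones := by
  intro m _
  unfold Spec_rollStones rollStones rollStones_alt
  rw [PySem.List.foldl_append_singleton_eq_map, PySem.List.foldl_append_singleton_eq_map]
  refine congrArg _ (List.map_congr_left fun x _ => ?_)
  rw [rowA, rowB]
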